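-- pv_equiv track=rewrite | github.com/mzazon/awesome-cloud-projects | aws/video-workflow-orchestration-stepfunctions/code/lambda/publisher.py | generate_corrective_actions
-- ===== SOURCE A (Python) =====
-- from typing import Dict, Any, List
--
-- def generate_corrective_actions(failed_checks: List[Dict[str, Any]], common_issues: List[str]) -> List[str]:
--     """Generate corrective actions based on failure analysis."""
--     actions = []
--
--     # Check for specific patterns
--     check_types = [check['check'] for check in failed_checks]
--
--     if 'file_exists' in check_types:
--         actions.append("Verify MediaConvert job configuration and output settings")
--
--     if 'file_size_valid' in check_types:
--         actions.append("Review encoding bitrate and compression settings")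
--
--     if 'format_supported' in check_types:
--         actions.append("Check output format configuration and container settings")
--
--     if 'resolution_appropriate' in check_types:
--         actions.append("Verify video resolution and scaling parameters")
--
--     if len(set(check_types)) > 2:
--         actions.append("Consider reviewing entire MediaConvert job template")
--
--     # Add general recommendations
--     if not actions:
--         actions.append("Review workflow logs for additional error information")
--
--     actions.append("Monitor subsequent jobs for similar issues")
--
--     return actions
-- ===== SOURCE B (Python) =====
-- MSGS = [
--     "Verify MediaConvert job configuration and output settings",
--     "Review encoding bitrate and compression settings",
--     "Check output format configuration and container settings",
--     "Verify video resolution and scaling parameters",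
-- ]
-- BITS = {'file_exists': 0, 'file_size_valid': 1,
--         'format_supported': 2, 'resolution_appropriate': 3}
--
-- def generate_corrective_actions(failed_checks, common_issues):
--     # One pass: fold the failure list into a 4-bit mask plus the set of distinct names.
--     mask = 0
--     seen = set()
--     for check in failed_checks:
--         name = check['check']
--         seen.add(name)
--         bit = BITS.get(name)
--         if bit is not None:
--             mask |= 1 << bit
--     actions = []
--     for i, msg in enumerate(MSGS):
--         if mask >> i & 1:
--             actions.append(msg)
--     if len(seen) > 2:
--         actions.append("Consider reviewing entire MediaConvert job template")
--     if not actions: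
--         actions.append("Review workflow logs for additional error information")
--     actions.append("Monitor subsequent jobs for similar issues")
--     return actions
-- ===== Notes on version B (the rewrite author's own statement) =====
-- stated objective: alternative
-- what changed: Replaces A's four separate membership scans of the check-type list plus a set build with a single left-to-right pass that folds each failed check into a 4-bit flag mask and a seen-set, then decodes the mask bit by bit into the action list.
-- outside the precondition, e.g. on generate_corrective_actions([{}], []): A raises KeyError, B raises KeyError
import Mathlib
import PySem

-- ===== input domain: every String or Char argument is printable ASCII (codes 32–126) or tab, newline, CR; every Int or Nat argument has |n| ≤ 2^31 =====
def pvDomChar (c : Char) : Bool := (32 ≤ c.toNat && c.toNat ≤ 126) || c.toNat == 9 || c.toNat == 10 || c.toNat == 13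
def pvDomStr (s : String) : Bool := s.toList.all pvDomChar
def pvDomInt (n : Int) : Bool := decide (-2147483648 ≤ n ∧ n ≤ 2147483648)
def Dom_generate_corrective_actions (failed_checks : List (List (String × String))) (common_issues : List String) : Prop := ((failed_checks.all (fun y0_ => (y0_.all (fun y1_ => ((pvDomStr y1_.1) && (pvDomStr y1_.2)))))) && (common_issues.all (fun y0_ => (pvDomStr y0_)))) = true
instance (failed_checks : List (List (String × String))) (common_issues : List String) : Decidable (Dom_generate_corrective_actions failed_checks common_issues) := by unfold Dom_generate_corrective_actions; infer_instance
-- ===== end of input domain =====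

-- B replaces A's four separate membership scans (plus a set build) with a single pass that
-- folds each failed check into a 4-bit flag mask and a seen-set, then decodes the mask
-- (objective: alternative; same asymptotic cost, one traversal instead of five).


-- ===== PORT A =====
-- check['check'] raises KeyError when absent; Pre_ excludes that, so getD's default is never used.
def generate_corrective_actions (failed_checks : List (List (String × String))) (common_issues : List String) : List String :=
  let check_types : List String :=
    failed_checks.map (fun check => ((PySem.Dict.mk check).get? "check").getD "")
  let actions : List String := []
  let actions := if check_types.contains "file_exists" then
    actions ++ ["Verify MediaConvert job configuration and output settings"] else actions
  let actions := if check_types.contains "file_size_valid" then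
    actions ++ ["Review encoding bitrate and compression settings"] else actions
  let actions := if check_types.contains "format_supported" then
    actions ++ ["Check output format configuration and container settings"] else actions
  let actions := if check_types.contains "resolution_appropriate" then
    actions ++ ["Verify video resolution and scaling parameters"] else actions
  let actions := if PySem.Set.len (PySem.Set.ofList check_types) > 2 then
    actions ++ ["Consider reviewing entire MediaConvert job template"] else actions
  let actions := if actions = [] then
    actions ++ ["Review workflow logs for additional error information"] else actions
  actions ++ ["Monitor subsequent jobs for similar issues"]

-- ===== PORT B =====
def pvMSGS : List String :=
  ["Verify MediaConvert job configuration and output settings",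
   "Review encoding bitrate and compression settings",
   "Check output format configuration and container settings",
   "Verify video resolution and scaling parameters"]

def pvBITS : PySem.Dict String Nat :=
  PySem.Dict.mk [("file_exists", 0), ("file_size_valid", 1),
                 ("format_supported", 2), ("resolution_appropriate", 3)]

def generate_corrective_actions_alt (failed_checks : List (List (String × String))) (common_issues : List String) : List String :=
  let st := failed_checks.foldl (fun (st : Nat × PySem.Set String) check =>
      let name := ((PySem.Dict.mk check).get? "check").getD ""
      let seen := PySem.Set.add st.2 name
      let mask := match pvBITS.get? name with
        | some bit => st.1 ||| (1 <<< bit)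
        | none => st.1
      (mask, seen)) ((0 : Nat), PySem.Set.empty)
  let actions := (PySem.List.enumerate pvMSGS 0).foldl
      (fun acc (p : Int × String) => if st.1 >>> p.1.toNat &&& 1 ≠ 0 then acc ++ [p.2] else acc)
      ([] : List String)
  let actions := if PySem.Set.len st.2 > 2 then
    actions ++ ["Consider reviewing entire MediaConvert job template"] else actions
  let actions := if actions = [] then
    actions ++ ["Review workflow logs for additional error information"] else actions
  actions ++ ["Monitor subsequent jobs for similar issues"]

-- ===== PRECONDITION & SPEC =====
-- Pre_ excludes dicts lacking the 'check' key, on which A (and B) raise KeyError.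
def Pre_generate_corrective_actions (failed_checks : List (List (String × String))) (common_issues : List String) : Prop :=
  failed_checks.all (fun d => (PySem.Dict.mk d).contains "check") = true
instance (failed_checks : List (List (String × String))) (common_issues : List String) : Decidable (Pre_generate_corrective_actions failed_checks common_issues) := by unfold Pre_generate_corrective_actions; infer_instance
def pvWitness_generate_corrective_actions : (List (List (String × String))) × List String :=
  ([[("check", "file_exists")], [("check", "format_supported")]], ["low bitrate"])

def Spec_generate_corrective_actions (failed_checks : List (List (String × String))) (common_issues : List String) (out : List String) : Prop := out = generate_corrective_actions_alt failed_checks common_issues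
instance (failed_checks : List (List (String × String))) (common_issues : List String) (out : List String) : Decidable (Spec_generate_corrective_actions failed_checks common_issues out) := by unfold Spec_generate_corrective_actions; infer_instance

-- ===== CLAIM (what is proved, stated in full; the proofs are below) =====
def Claim_equal_generate_corrective_actions : Prop := ∀ (failed_checks : List (List (String × String))) (common_issues : List String), Dom_generate_corrective_actions failed_checks common_issues → Pre_generate_corrective_actions failed_checks common_issues → Spec_generate_corrective_actions failed_checks common_issues (generate_corrective_actions failed_checks common_issues)

-- ===== LEMMAS AND PROOFS =====
def pvF (check : List (String × String)) : String :=
  ((PySem.Dict.mk check).get? "check").getD ""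

def pvStep (st : Nat × PySem.Set String) (name : String) : Nat × PySem.Set String :=
  (match pvBITS.get? name with
    | some bit => st.1 ||| (1 <<< bit)
    | none => st.1, PySem.Set.add st.2 name)

theorem fold_eq (fc : List (List (String × String))) (st : Nat × PySem.Set String) :
    fc.foldl (fun (st : Nat × PySem.Set String) check =>
      let name := ((PySem.Dict.mk check).get? "check").getD ""
      let seen := PySem.Set.add st.2 name
      let mask := match pvBITS.get? name with
        | some bit => st.1 ||| (1 <<< bit)
        | none => st.1
      (mask, seen)) st = (fc.map pvF).foldl pvStep st := by
  induction fc generalizing st with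
  | nil => rfl
  | cons c cs ih => simp only [List.foldl_cons, List.map_cons, ih]; rfl

theorem snd_foldl (names : List String) (st : Nat × PySem.Set String) :
    (names.foldl pvStep st).2 = PySem.Set.update st.2 names := by
  induction names generalizing st with
  | nil => rfl
  | cons n ns ih => simp only [List.foldl_cons, ih, PySem.Set.update, pvStep]

theorem bitTest_or (a b i : Nat) :
    ((a ||| b) >>> i &&& 1 ≠ 0) ↔ (a >>> i &&& 1 ≠ 0) ∨ (b >>> i &&& 1 ≠ 0) := by
  have h : ∀ x : Nat, (x >>> i &&& 1 ≠ 0) ↔ x.testBit i = true := by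
    intro x
    simp [Nat.testBit, Nat.and_comm]
  rw [h, h, h, Nat.testBit_or]
  simp

theorem bitTest_shift (b i : Nat) : ((1 <<< b) >>> i &&& 1 ≠ 0) ↔ b = i := by
  have h : ((1 <<< b) >>> i &&& 1 ≠ 0) ↔ (1 <<< b : Nat).testBit i = true := by
    simp [Nat.testBit, Nat.and_comm]
  rw [h, Nat.one_shiftLeft, Nat.testBit_two_pow]
  simp

theorem fst_bit (names : List String) (st : Nat × PySem.Set String) (i : Nat) :
    ((names.foldl pvStep st).1 >>> i &&& 1 ≠ 0) ↔
      (st.1 >>> i &&& 1 ≠ 0) ∨ ∃ n ∈ names, pvBITS.get? n = some i := by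
  induction names generalizing st with
  | nil => simp
  | cons n ns ih =>
    simp only [List.foldl_cons, ih, List.mem_cons]
    cases h : pvBITS.get? n with
    | none =>
      simp only [pvStep, h]
      constructor
      · rintro (hb | ⟨m, hm, hget⟩)
        · exact Or.inl hb
        · exact Or.inr ⟨m, Or.inr hm, hget⟩
      · rintro (hb | ⟨m, (rfl | hm), hget⟩)
        · exact Or.inl hb
        · rw [h] at hget; cases hget
        · exact Or.inr ⟨m, hm, hget⟩
    | some b =>
      simp only [pvStep, h, bitTest_or, bitTest_shift]
      constructor
      · rintro ((hb | rfl) | ⟨m, hm, hget⟩)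
        · exact Or.inl hb
        · exact Or.inr ⟨n, Or.inl rfl, h⟩
        · exact Or.inr ⟨m, Or.inr hm, hget⟩
      · rintro (hb | ⟨m, (rfl | hm), hget⟩)
        · exact Or.inl (Or.inl hb)
        · rw [h] at hget; cases hget; exact Or.inl (Or.inr rfl)
        · exact Or.inr ⟨m, hm, hget⟩

theorem bits_some (n : String) (i : Nat) :
    pvBITS.get? n = some i ↔
      (i = 0 ∧ n = "file_exists") ∨ (i = 1 ∧ n = "file_size_valid") ∨
      (i = 2 ∧ n = "format_supported") ∨ (i = 3 ∧ n = "resolution_appropriate") := by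
  simp only [pvBITS, PySem.Dict.get?_mk_cons, beq_iff_eq]
  split_ifs with h1 h2 h3 h4
  · subst h1; simp [eq_comm]
  · subst h2; simp [eq_comm]
  · subst h3; simp [eq_comm]
  · subst h4; simp [eq_comm]
  · simp [show (PySem.Dict.mk ([] : List (String × Nat))).get? n = none from rfl,
      Ne.symm h1, Ne.symm h2, Ne.symm h3, Ne.symm h4]

theorem mask_bit (names : List String) (i : Nat) (t : String)
    (ht : ∀ n, pvBITS.get? n = some i ↔ n = t) :
    ((names.foldl pvStep (0, PySem.Set.empty)).1 >>> i &&& 1 ≠ 0) ↔ names.contains t = true := by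
  rw [fst_bit]
  simp only [ht, List.contains_iff_mem]
  constructor
  · rintro (h | ⟨m, hm, rfl⟩)
    · simp at h
    · exact hm
  · intro h; exact Or.inr ⟨t, h, rfl⟩

-- ===== VERDICT (by name: the statement is the Claim_ definition above) =====
set_option maxHeartbeats 2000000 in
theorem generate_corrective_actions_spec : Claim_equal_generate_corrective_actions := by
  intro fc ci _ _
  unfold Spec_generate_corrective_actions generate_corrective_actions generate_corrective_actions_alt
  rw [fold_eq]
  have hm0 := mask_bit (fc.map pvF) 0 "file_exists" (by intro n; rw [bits_some]; simp)
  have hm1 := mask_bit (fc.map pvF) 1 "file_size_valid" (by intro n; rw [bits_some]; simp)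
  have hm2 := mask_bit (fc.map pvF) 2 "format_supported" (by intro n; rw [bits_some]; simp)
  have hm3 := mask_bit (fc.map pvF) 3 "resolution_appropriate" (by intro n; rw [bits_some]; simp)
  have hs : ((fc.map pvF).foldl pvStep (0, PySem.Set.empty)).2 = PySem.Set.ofList (fc.map pvF) := by
    rw [snd_foldl]; rfl
  rw [show (fun check : List (String × String) => ((PySem.Dict.mk check).get? "check").getD "") = pvF from rfl]
  simp only [pvMSGS, PySem.List.enumerate_cons, PySem.List.enumerate_nil, List.foldl_cons,
    List.foldl_nil, Int.reduceAdd, Int.reduceToNat]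
  simp only [hm0, hm1, hm2, hm3, hs]
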